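-- pv_equiv track=rewrite | github.com/AsmitKT/DSA | Arrays/Algorithms/Sorting/Non-Comparison/radix_sort_msd.py | msd_radix_sort
-- ===== SOURCE A (Python) =====
-- def msd_radix_sort(arr, exp):
-- 	if len(arr) <= 1 or exp == 0:
-- 		return arr
-- 	buckets = [[] for _ in range(10)]
-- 	for num in arr:
-- 		buckets[(num // exp) % 10].append(num)
-- 	res = []
-- 	for bucket in buckets:
-- 		if exp > 1:
-- 			res.extend(msd_radix_sort(bucket, exp // 10))
-- 		else:
-- 			res.extend(bucket)
-- 	return res
-- ===== SOURCE B (Python) =====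
-- def msd_radix_sort(arr, exp):
--     if len(arr) <= 1 or exp == 0:
--         return arr
--     # digit places the MSD recursion buckets on, most significant first
--     places = [exp]
--     e = exp
--     while e > 1:
--         e //= 10
--         if e >= 1:
--             places.append(e)
--     # iterative LSD: one stable filter pass per place, least significant first
--     for p in reversed(places):
--         arr = [num for d in range(10) for num in arr if (num // p) % 10 == d]
--     return arr
-- ===== Notes on version B (the rewrite author's own statement) =====
-- stated objective: alternative
-- what changed: Replaces the recursive MSD bucket distribution with an iterative LSD radix sort: it first computes the chain of digit places, then applies one stable filter pass per place from least to most significant, with no recursion and no nested bucket lists.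
import Mathlib
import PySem

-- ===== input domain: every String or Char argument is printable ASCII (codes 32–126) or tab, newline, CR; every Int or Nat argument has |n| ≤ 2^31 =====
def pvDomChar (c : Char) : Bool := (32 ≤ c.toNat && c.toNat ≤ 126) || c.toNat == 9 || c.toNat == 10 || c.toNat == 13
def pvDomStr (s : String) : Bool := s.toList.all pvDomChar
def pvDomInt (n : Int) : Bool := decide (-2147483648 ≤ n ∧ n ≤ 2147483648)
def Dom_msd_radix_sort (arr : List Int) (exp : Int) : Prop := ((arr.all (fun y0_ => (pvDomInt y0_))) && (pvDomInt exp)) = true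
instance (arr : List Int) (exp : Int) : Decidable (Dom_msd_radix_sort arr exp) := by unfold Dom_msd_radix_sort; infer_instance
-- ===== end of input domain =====

-- B re-implements A's recursive MSD bucket sort as an iterative LSD radix sort (stable
-- filter pass per digit place); equivalence of the return values is proved on all inputs.

-- ===== PORT A =====
-- Python's 10-element `buckets` list of lists is represented as an index function
-- Int → List Int (the index (num//exp)%10 always lies in 0..9, so list indexing never
-- raises and the function table holds exactly the 10 buckets); `buckets[i].append(num)`
-- is the pointwise update below, and `for bucket in buckets` iterates the indices 0..9
-- in order (pyRange 0 10 1).  The `res` loop is the explicit recursion msdResLoop over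
-- the remaining bucket indices with accumulator `res`.
mutual
def msd_radix_sort (arr : List Int) (exp : Int) : List Int :=
  if arr.length ≤ 1 ∨ exp = 0 then arr
  else
    let buckets : Int → List Int :=
      arr.foldl
        (fun bs num => fun j =>
          if j = PySem.Int.mod (PySem.Int.floordiv num exp) 10 then bs j ++ [num] else bs j)
        (fun _ => [])
    msdResLoop buckets exp (PySem.List.pyRange 0 10 1) []
termination_by 12 * exp.toNat + 11
decreasing_by
  have hlen : (PySem.List.pyRange 0 10 1).length = 10 := by decide
  omega

def msdResLoop (buckets : Int → List Int) (exp : Int) (ds : List Int) (res : List Int) : List Int :=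
  match ds with
  | [] => res
  | d :: rest =>
      msdResLoop buckets exp rest
        (res ++ (if _h : exp > 1 then msd_radix_sort (buckets d) (PySem.Int.floordiv exp 10) else buckets d))
termination_by 12 * exp.toNat + ds.length
decreasing_by
  · rw [PySem.Int.floordiv_eq_ediv_of_pos (by omega : (0:Int) < 10)]
    simp only [List.length_cons]
    omega
  · simp only [List.length_cons]
    omega
end

-- ===== PORT B =====
-- the while-loop building `places` (MSD order)
def placesLoop (e : Int) (places : List Int) : List Int :=
  if _h : e > 1 then
    placesLoop (PySem.Int.floordiv e 10)
      (if PySem.Int.floordiv e 10 ≥ 1 then places ++ [PySem.Int.floordiv e 10] else places)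
  else places
termination_by e.toNat
decreasing_by
  have h10 : PySem.Int.floordiv e 10 = e / 10 := PySem.Int.floordiv_eq_ediv_of_pos (by omega)
  rw [h10]; omega

-- one stable pass: the comprehension [num for d in range(10) for num in arr if (num//p)%10 == d]
def lsdPass (p : Int) (arr : List Int) : List Int :=
  (PySem.List.pyRange 0 10 1).flatMap
    (fun d => arr.filter (fun num => PySem.Int.mod (PySem.Int.floordiv num p) 10 == d))

def msd_radix_sort_alt (arr : List Int) (exp : Int) : List Int :=
  if arr.length ≤ 1 ∨ exp = 0 then arr
  else (placesLoop exp [exp]).reverse.foldl (fun a p => lsdPass p a) arr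

-- ===== PRECONDITION & SPEC =====
def Spec_msd_radix_sort (arr : List Int) (exp : Int) (out : List Int) : Prop := out = msd_radix_sort_alt arr exp
instance (arr : List Int) (exp : Int) (out : List Int) : Decidable (Spec_msd_radix_sort arr exp out) := by unfold Spec_msd_radix_sort; infer_instance

-- ===== CLAIM (what is proved, stated in full; the proofs are below) =====
def Claim_equal_msd_radix_sort : Prop := ∀ (arr : List Int) (exp : Int), Dom_msd_radix_sort arr exp → Spec_msd_radix_sort arr exp (msd_radix_sort arr exp)

-- ===== LEMMAS AND PROOFS =====

-- the chain of digit places strictly below e (those B's while-loop appends after [exp])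
def chainTail (e : Int) : List Int :=
  if _h : e > 1 then
    (if PySem.Int.floordiv e 10 ≥ 1 then [PySem.Int.floordiv e 10] else []) ++
      chainTail (PySem.Int.floordiv e 10)
  else []
termination_by e.toNat
decreasing_by
  rw [PySem.Int.floordiv_eq_ediv_of_pos (by omega : (0:Int) < 10)]
  omega

theorem placesLoop_eq (e : Int) (acc : List Int) : placesLoop e acc = acc ++ chainTail e := by
  induction e, acc using placesLoop.induct with
  | case1 e acc h ih =>
      rw [placesLoop, chainTail]
      simp only [dif_pos h]
      by_cases h2 : PySem.Int.floordiv e 10 ≥ 1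
      · simp only [if_pos h2, dif_pos h2] at ih ⊢
        rw [ih]; simp
      · simp only [if_neg h2, dif_neg h2] at ih ⊢
        rw [ih]; simp
  | case2 e acc h =>
      rw [placesLoop, chainTail]
      simp [h]

-- LSD reference: apply the passes from the least significant place up
def lsdSort : List Int → List Int → List Int
  | [], arr => arr
  | p :: ps, arr => lsdPass p (lsdSort ps arr)

theorem foldr_eq_lsdSort (ps : List Int) (arr : List Int) :
    ps.foldr (fun p a => lsdPass p a) arr = lsdSort ps arr := by
  induction ps with
  | nil => rfl
  | cons p ps ih => simp [lsdSort, ih]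

theorem alt_eq_lsdSort (arr : List Int) (exp : Int) (h : ¬ (arr.length ≤ 1 ∨ exp = 0)) :
    msd_radix_sort_alt arr exp = lsdSort (exp :: chainTail exp) arr := by
  rw [msd_radix_sort_alt, if_neg h, placesLoop_eq, List.foldl_reverse, foldr_eq_lsdSort]
  rfl

-- a stable pass commutes with any filter
theorem filter_lsdPass (q : Int → Bool) (p : Int) (arr : List Int) :
    (lsdPass p arr).filter q = lsdPass p (arr.filter q) := by
  simp only [lsdPass, List.filter_flatMap, List.filter_filter]
  congr 1
  funext d
  congr 1
  funext n
  exact Bool.and_comm _ _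

theorem filter_lsdSort (q : Int → Bool) (ps : List Int) (arr : List Int) :
    (lsdSort ps arr).filter q = lsdSort ps (arr.filter q) := by
  induction ps generalizing arr with
  | nil => rfl
  | cons p ps ih => simp [lsdSort, filter_lsdPass, ih]

theorem pyRange_ten : PySem.List.pyRange 0 10 1 = [0,1,2,3,4,5,6,7,8,9] := by decide

theorem lsdPass_short (p : Int) (arr : List Int) (h : arr.length ≤ 1) : lsdPass p arr = arr := by
  match arr, h with
  | [], _ => simp [lsdPass]
  | [x], _ =>
      have h0 := PySem.Int.mod_nonneg (PySem.Int.floordiv x p) (by omega : (0:Int) < 10)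
      have h1 := PySem.Int.mod_lt (PySem.Int.floordiv x p) (by omega : (0:Int) < 10)
      rw [lsdPass, pyRange_ten]
      simp only [List.flatMap_cons, List.flatMap_nil, List.append_nil, List.filter_cons,
        List.filter_nil]
      set m := PySem.Int.mod (PySem.Int.floordiv x p) 10 with hm
      interval_cases m <;> simp

theorem lsdSort_short (ps : List Int) (arr : List Int) (h : arr.length ≤ 1) :
    lsdSort ps arr = arr := by
  induction ps with
  | nil => rfl
  | cons p ps ih => rw [lsdSort, ih, lsdPass_short p arr h]

-- A's bucket table is the family of digit filters
theorem buckets_eq (e : Int) (arr : List Int) (f0 : Int → List Int) (d : Int) :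
    (arr.foldl
      (fun bs num => fun j =>
        if j = PySem.Int.mod (PySem.Int.floordiv num e) 10 then bs j ++ [num] else bs j)
      f0) d
    = f0 d ++ arr.filter (fun n => PySem.Int.mod (PySem.Int.floordiv n e) 10 == d) := by
  induction arr generalizing f0 with
  | nil => simp
  | cons x xs ih =>
      rw [List.foldl_cons, ih, List.filter_cons]
      by_cases hx : PySem.Int.mod (PySem.Int.floordiv x e) 10 = d
      · rw [if_pos hx.symm,
          if_pos (by simp only [beq_iff_eq]; exact hx : (PySem.Int.mod (PySem.Int.floordiv x e) 10 == d) = true)]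
        simp
      · rw [if_neg (fun hh => hx hh.symm),
          if_neg (by simp only [beq_iff_eq]; exact hx : ¬ (PySem.Int.mod (PySem.Int.floordiv x e) 10 == d) = true)]

-- A's res loop is a flatMap over the bucket indices
theorem msdResLoop_eq (buckets : Int → List Int) (e : Int) (ds res : List Int) :
    msdResLoop buckets e ds res
    = res ++ ds.flatMap
        (fun d => if e > 1 then msd_radix_sort (buckets d) (PySem.Int.floordiv e 10) else buckets d) := by
  induction ds generalizing res with
  | nil => rw [msdResLoop]; simp
  | cons d rest ih =>
      rw [msdResLoop, ih, List.flatMap_cons]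
      split <;> simp

-- one pass on top of the LSD reference refines each digit class separately
theorem filter_lsdSort_flatMap (e : Int) (arr : List Int) :
    lsdPass e (lsdSort (chainTail e) arr)
    = (PySem.List.pyRange 0 10 1).flatMap
        (fun d => lsdSort (chainTail e)
          (arr.filter (fun n => PySem.Int.mod (PySem.Int.floordiv n e) 10 == d))) := by
  rw [lsdPass]
  congr 1
  funext d
  exact filter_lsdSort _ _ _

-- main: A equals the LSD reference on the place chain
theorem msd_eq_lsdSort :
    ∀ (n : Nat) (e : Int), e.toNat ≤ n → e ≠ 0 →
      ∀ arr, msd_radix_sort arr e = lsdSort (e :: chainTail e) arr := by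
  intro n
  induction n with
  | zero =>
      intro e hn he arr
      rw [msd_radix_sort]
      by_cases hg : arr.length ≤ 1 ∨ e = 0
      · rw [if_pos hg]
        exact (lsdSort_short _ arr (hg.resolve_right he)).symm
      · rw [if_neg hg]
        have hle : ¬ e > 1 := by omega
        simp only [msdResLoop_eq, if_neg hle, List.nil_append]
        rw [lsdSort, chainTail, dif_neg hle]
        simp only [lsdSort]
        rw [lsdPass]
        congr 1
        funext d
        rw [buckets_eq]
        simp
  | succ n ih =>
      intro e hn he arr
      rw [msd_radix_sort]
      by_cases hg : arr.length ≤ 1 ∨ e = 0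
      · rw [if_pos hg]
        exact (lsdSort_short _ arr (hg.resolve_right he)).symm
      · rw [if_neg hg]
        simp only [msdResLoop_eq, List.nil_append]
        conv_rhs => rw [lsdSort]
        rw [filter_lsdSort_flatMap e arr]
        congr 1
        funext d
        rw [buckets_eq]
        simp only [List.nil_append]
        by_cases h1 : e > 1
        · have h10 : PySem.Int.floordiv e 10 = e / 10 :=
            PySem.Int.floordiv_eq_ediv_of_pos (by omega)
          rw [if_pos h1, chainTail]
          simp only [dif_pos h1]
          by_cases h2 : PySem.Int.floordiv e 10 ≥ 1
          · simp only [if_pos h2, List.singleton_append]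
            exact ih (PySem.Int.floordiv e 10) (by rw [h10]; omega)
              (by rw [h10]; rw [h10] at h2; omega) _
          · have h0 : PySem.Int.floordiv e 10 = 0 := by
              rw [h10] at h2 ⊢; omega
            simp only [h0]
            rw [msd_radix_sort]
            simp [lsdSort, chainTail]
        · rw [if_neg h1, chainTail]
          simp only [dif_neg h1]
          rfl

-- ===== VERDICT (by name: the statement is the Claim_ definition above) =====
theorem msd_radix_sort_spec : Claim_equal_msd_radix_sort := by
  intro arr exp _
  unfold Spec_msd_radix_sort
  by_cases hg : arr.length ≤ 1 ∨ exp = 0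
  · rw [msd_radix_sort, if_pos hg, msd_radix_sort_alt, if_pos hg]
  · have he : exp ≠ 0 := fun h => hg (Or.inr h)
    rw [msd_eq_lsdSort exp.toNat exp le_rfl he arr, alt_eq_lsdSort arr exp hg]
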